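-- pv_equiv track=rewrite | github.com/numancirpan/Chatbot | pipeline/build_finetune_datasets.py | build_chunks_by_url
-- ===== SOURCE A (Python) =====
-- from typing import Dict, Iterable, List
--
-- def normalize_url(url: str) -> str:
--     return url.strip().lower().rstrip("/")
--
-- def build_chunks_by_url(chunks: List[Dict]) -> Dict[str, List[Dict]]:
--     mapping: Dict[str, List[Dict]] = {}
--     for chunk in chunks:
--         url = normalize_url(chunk.get("source_url", ""))
--         if not url:
--             continue
--         mapping.setdefault(url, []).append(chunk)
--     return mapping
-- ===== SOURCE B (Python) =====
-- from typing import Dict, List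
--
-- def normalize_url(url: str) -> str:
--     return url.strip().lower().rstrip("/")
--
-- def build_chunks_by_url(chunks: List[Dict]) -> Dict[str, List[Dict]]:
--     pairs = [(normalize_url(c.get("source_url", "")), c) for c in chunks]
--     keys = list(dict.fromkeys(u for u, _ in pairs if u))
--     return {u: [c for v, c in pairs if v == u] for u in keys}
-- ===== Notes on version B (the rewrite author's own statement) =====
-- stated objective: alternative
-- what changed: Replaces the single-pass dict setdefault-append accumulation by a two-phase plan: precompute all (normalized_url, chunk) pairs, dedup the non-empty urls in first-occurrence order, then build each group by a per-key filter comprehension.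
import Mathlib
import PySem

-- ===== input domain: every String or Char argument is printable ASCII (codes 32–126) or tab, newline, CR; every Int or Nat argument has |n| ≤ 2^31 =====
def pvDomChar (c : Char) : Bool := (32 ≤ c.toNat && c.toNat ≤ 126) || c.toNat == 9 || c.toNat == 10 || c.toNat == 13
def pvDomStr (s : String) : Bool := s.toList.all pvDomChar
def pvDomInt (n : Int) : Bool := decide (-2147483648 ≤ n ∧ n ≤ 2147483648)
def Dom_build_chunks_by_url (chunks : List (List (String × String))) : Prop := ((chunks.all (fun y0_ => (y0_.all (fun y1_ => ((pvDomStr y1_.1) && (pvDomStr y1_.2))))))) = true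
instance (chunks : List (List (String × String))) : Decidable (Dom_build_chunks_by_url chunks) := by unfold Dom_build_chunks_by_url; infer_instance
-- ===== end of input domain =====

-- B groups by precomputing (normalized url, chunk) pairs, deduping the non-empty urls, then filtering per key,
-- instead of A's one-pass dict setdefault-append accumulation (objective: alternative decomposition, same result).

-- ===== PORT A =====
-- url.rstrip("/") — hand port (PySem has no rstrip-with-chars): drop trailing '/' characters; exact for this single-char set
def pvRstripSlash (cs : List Char) : List Char := (cs.reverse.dropWhile (fun c => c == '/')).reverse

-- normalize_url: url.strip().lower().rstrip("/")
def normalize_url (url : String) : String := String.ofList (pvRstripSlash (PySem.Str.lower (PySem.Str.strip url)).toList)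

def build_chunks_by_url (chunks : List (List (String × String))) : List (String × List (List (String × String))) :=
  (chunks.foldl
    (fun (mapping : PySem.Dict String (List (List (String × String)))) chunk =>
      let url := normalize_url (PySem.Dict.getD (PySem.Dict.mk chunk) "source_url" "")
      if url = "" then mapping
      else PySem.Dict.modify mapping url [] (fun l => l ++ [chunk]))   -- mapping.setdefault(url, []).append(chunk)
    PySem.Dict.empty).items

-- ===== PORT B =====
def build_chunks_by_url_alt (chunks : List (List (String × String))) : List (String × List (List (String × String))) :=
  let pairs := chunks.map (fun c => (normalize_url (PySem.Dict.getD (PySem.Dict.mk c) "source_url" ""), c))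
  let keys := PySem.List.dedup ((pairs.map Prod.fst).filter (fun u => !(u == "")))
  keys.map (fun u => (u, (pairs.filter (fun p => p.1 == u)).map Prod.snd))

-- ===== PRECONDITION & SPEC =====
def Spec_build_chunks_by_url (chunks : List (List (String × String))) (out : List (String × List (List (String × String)))) : Prop := out = build_chunks_by_url_alt chunks
instance (chunks : List (List (String × String))) (out : List (String × List (List (String × String)))) : Decidable (Spec_build_chunks_by_url chunks out) := by unfold Spec_build_chunks_by_url; infer_instance

-- ===== CLAIM (what is proved, stated in full; the proofs are below) =====
def Claim_equal_build_chunks_by_url : Prop := ∀ (chunks : List (List (String × String))), Dom_build_chunks_by_url chunks → Spec_build_chunks_by_url chunks (build_chunks_by_url chunks)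

-- ===== LEMMAS AND PROOFS =====

-- abbreviations for the proof
def pvN (c : List (String × String)) : String := normalize_url (PySem.Dict.getD (PySem.Dict.mk c) "source_url" "")
def pvKeys (l : List (List (String × String))) : List String := PySem.List.dedup ((l.map pvN).filter (fun u => !(u == "")))
def pvG (l : List (List (String × String))) : List (String × List (List (String × String))) :=
  (pvKeys l).map (fun u => (u, l.filter (fun c => pvN c == u)))

lemma pvB_eq_G (l : List (List (String × String))) : build_chunks_by_url_alt l = pvG l := by
  unfold build_chunks_by_url_alt pvG pvKeys pvN
  simp [List.filter_map, Function.comp_def]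

lemma pvKeys_nodup (l : List (List (String × String))) : (pvKeys l).Nodup := by
  unfold pvKeys PySem.List.dedup
  exact PySem.Set.nodup_ofList _

lemma pvMem_keys (l : List (List (String × String))) (u : String) :
    u ∈ pvKeys l ↔ (u ≠ "" ∧ ∃ c ∈ l, pvN c = u) := by
  unfold pvKeys PySem.List.dedup
  rw [PySem.Set.mem_ofList, List.mem_filter]
  simp only [List.mem_map, Bool.not_eq_eq_eq_not, Bool.not_true, beq_eq_false_iff_ne, ne_eq]
  constructor
  · rintro ⟨⟨c, hc, rfl⟩, hne⟩; exact ⟨hne, c, hc, rfl⟩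
  · rintro ⟨hne, c, hc, rfl⟩; exact ⟨⟨c, hc, rfl⟩, hne⟩

lemma pvFind_map (ks : List String) (F : String → List (List (String × String))) (u : String)
    (hnd : ks.Nodup) (hu : u ∈ ks) :
    (ks.map (fun k => (k, F k))).find? (fun p => p.1 == u) = some (u, F u) := by
  induction ks with
  | nil => cases hu
  | cons k t ih =>
      rcases List.mem_cons.mp hu with h | h
      · subst h; simp
      · have hk : k ≠ u := fun e => (List.nodup_cons.mp hnd).1 (e ▸ h)
        simp [hk, ih (List.nodup_cons.mp hnd).2 h]

lemma pvContains_G (l : List (List (String × String))) (u : String) :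
    (PySem.Dict.mk (pvG l)).contains u = decide (u ∈ pvKeys l) := by
  unfold PySem.Dict.contains pvG
  simp [List.any_map, Function.comp_def, List.any_beq']

lemma pvKeys_append (l : List (List (String × String))) (c : List (String × String)) :
    pvKeys (l ++ [c]) =
      if pvN c = "" then pvKeys l
      else if pvN c ∈ pvKeys l then pvKeys l else pvKeys l ++ [pvN c] := by
  unfold pvKeys PySem.List.dedup
  rw [List.map_append, List.filter_append]
  by_cases h : pvN c = ""
  · simp [h]
  · simp only [List.map_cons, List.map_nil, List.filter_cons, List.filter_nil, h]
    simp only [show (!(pvN c == "")) = true by simp [h], if_pos]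
    rw [show PySem.Set.ofList (((l.map pvN).filter (fun u => !(u == ""))) ++ [pvN c])
        = PySem.Set.add (PySem.Set.ofList ((l.map pvN).filter (fun u => !(u == "")))) (pvN c) from by
      simp [PySem.Set.ofList_eq_foldl, List.foldl_append]]
    unfold PySem.Set.add
    simp [h]

lemma pvFilter_append_single (l : List (List (String × String))) (c : List (String × String)) (u : String) :
    (l ++ [c]).filter (fun x => pvN x == u) =
      l.filter (fun x => pvN x == u) ++ (if pvN c = u then [c] else []) := by
  rw [List.filter_append]
  by_cases h : pvN c = u <;> simp [h]

lemma pvGetD_G (l : List (List (String × String))) (u : String) (hu : u ≠ "") :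
    (PySem.Dict.mk (pvG l)).getD u [] = l.filter (fun x => pvN x == u) := by
  unfold PySem.Dict.getD PySem.Dict.get?
  by_cases hm : u ∈ pvKeys l
  · rw [show (PySem.Dict.mk (pvG l)).items = pvG l from rfl]
    unfold pvG
    rw [pvFind_map _ _ _ (pvKeys_nodup l) hm]
    rfl
  · have hfind : (pvG l).find? (fun p => p.1 == u) = none := by
      rw [List.find?_eq_none]
      intro p hp
      rcases List.mem_map.mp hp with ⟨k, hk, rfl⟩
      intro e
      exact hm ((eq_of_beq e) ▸ hk)
    have hfil : l.filter (fun x => pvN x == u) = [] := by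
      rw [List.filter_eq_nil_iff]
      intro x hx e
      exact hm ((pvMem_keys l u).mpr ⟨hu, x, hx, eq_of_beq e⟩)
    rw [show (PySem.Dict.mk (pvG l)).items = pvG l from rfl, hfind, hfil]
    rfl

lemma pvStep_G (l : List (List (String × String))) (c : List (String × String)) :
    (if pvN c = "" then PySem.Dict.mk (pvG l)
     else PySem.Dict.modify (PySem.Dict.mk (pvG l)) (pvN c) [] (fun xs => xs ++ [c]))
      = PySem.Dict.mk (pvG (l ++ [c])) := by
  by_cases h : pvN c = ""
  · rw [if_pos h]
    congr 1
    unfold pvG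
    rw [pvKeys_append, if_pos h]
    apply List.map_congr_left
    intro k hk
    have hkne : k ≠ "" := ((pvMem_keys l k).mp hk).1
    rw [pvFilter_append_single, if_neg (by rw [h]; exact fun e => hkne e.symm), List.append_nil]
  · rw [if_neg h]
    unfold PySem.Dict.modify
    rw [pvGetD_G _ _ h]
    unfold PySem.Dict.insert
    rw [pvContains_G]
    by_cases hm : pvN c ∈ pvKeys l
    · rw [if_pos (by simp [hm])]
      congr 1
      rw [show (PySem.Dict.mk (pvG l)).items = pvG l from rfl]
      unfold pvG
      rw [pvKeys_append, if_neg h, if_pos hm, List.map_map]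
      apply List.map_congr_left
      intro k hk
      simp only [Function.comp_def]
      by_cases hku : k = pvN c
      · subst hku
        rw [if_pos (by simp), pvFilter_append_single, if_pos rfl]
      · rw [if_neg (by simp [hku]), pvFilter_append_single, if_neg (fun e => hku e.symm), List.append_nil]
    · rw [if_neg (by simp [hm])]
      congr 1
      rw [show (PySem.Dict.mk (pvG l)).items = pvG l from rfl]
      unfold pvG
      rw [pvKeys_append, if_neg h, if_neg hm, List.map_append]
      congr 1
      · apply List.map_congr_left
        intro k hk
        have hku : pvN c ≠ k := fun e => hm (e ▸ hk)
        rw [pvFilter_append_single, if_neg hku, List.append_nil]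
      · have hfil : l.filter (fun x => pvN x == pvN c) = [] := by
          rw [List.filter_eq_nil_iff]
          intro x hx e
          exact hm ((pvMem_keys l (pvN c)).mpr ⟨h, x, hx, eq_of_beq e⟩)
        rw [List.map_cons, List.map_nil, pvFilter_append_single, if_pos rfl, hfil]

lemma pvFold_G (l : List (List (String × String))) :
    l.foldl
      (fun (mapping : PySem.Dict String (List (List (String × String)))) chunk =>
        let url := normalize_url (PySem.Dict.getD (PySem.Dict.mk chunk) "source_url" "")
        if url = "" then mapping
        else PySem.Dict.modify mapping url [] (fun xs => xs ++ [chunk]))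
      PySem.Dict.empty = PySem.Dict.mk (pvG l) := by
  induction l using List.reverseRecOn with
  | nil => rfl
  | append_singleton l c ih =>
      rw [List.foldl_append, ih]
      simpa [pvN] using pvStep_G l c

-- ===== VERDICT (by name: the statement is the Claim_ definition above) =====
theorem build_chunks_by_url_spec : Claim_equal_build_chunks_by_url := by
  intro chunks _
  unfold Spec_build_chunks_by_url build_chunks_by_url
  rw [pvFold_G, pvB_eq_G]
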